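-- pv_equiv track=rewrite | github.com/MissaelSanchezVillegas/Concrete-Delivery-Problem | Reduccionsolucion.py | nodollegadaycamion
-- ===== SOURCE A (Python) =====
-- def nodollegadaycamion(lista):                      #me regresa el node de llegada y el camion en lo que respecta a la variable w
-- 	indice=0
-- 	copia=lista.copy()
-- 	nuevalista=[]
-- 	count=0
-- 	aux=0
-- 	for x in lista:
-- 		if(x=="." and count==1):
-- 			ultimo=indice
-- 			nuevalista.append(''.join(lista[primerultimo+1:ultimo]))
-- 			return nuevalista
-- 		if(x=="." and count==0 and lista[0]!="d"):
-- 			primerultimo=indice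
-- 			count=count+1
-- 			nuevalista.append(''.join(copia[0:primerultimo]))
-- 		if(x=="s" and lista[0]=="d"):
-- 			aux=indice
-- 		if(x=="." and count==0 and lista[0]=="d"):
-- 			primerultimo=aux
-- 			count=count+1
-- 			nuevalista.append(''.join(copia[0:primerultimo]))
-- 			primerultimo=indice
-- 		indice=indice+1
-- ===== SOURCE B (Python) =====
-- def nodollegadaycamion(lista):
--     try:
--         i1 = lista.index(".")
--         i2 = lista.index(".", i1 + 1)
--     except ValueError:
--         return None
--     middle = "".join(lista[i1 + 1:i2])
--     if lista[0] == "d":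
--         ks = [k for k, v in enumerate(lista[:i1]) if v == "s"]
--         head = "".join(lista[:ks[-1] if ks else 0])
--     else:
--         head = "".join(lista[:i1])
--     return [head, middle]
-- ===== Notes on version B (the rewrite author's own statement) =====
-- stated objective: simpler
-- what changed: Replaces A's single-pass state machine (indice/count/aux/primerultimo mutated across sequential if-blocks) by direct index arithmetic: find the first two '.' positions with C-level list.index, slice-and-join the middle, and take the last 's' index before the first dot from an enumerate comprehension (same O(n), smaller constant: no per-element interpreted loop).
import Mathlib
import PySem

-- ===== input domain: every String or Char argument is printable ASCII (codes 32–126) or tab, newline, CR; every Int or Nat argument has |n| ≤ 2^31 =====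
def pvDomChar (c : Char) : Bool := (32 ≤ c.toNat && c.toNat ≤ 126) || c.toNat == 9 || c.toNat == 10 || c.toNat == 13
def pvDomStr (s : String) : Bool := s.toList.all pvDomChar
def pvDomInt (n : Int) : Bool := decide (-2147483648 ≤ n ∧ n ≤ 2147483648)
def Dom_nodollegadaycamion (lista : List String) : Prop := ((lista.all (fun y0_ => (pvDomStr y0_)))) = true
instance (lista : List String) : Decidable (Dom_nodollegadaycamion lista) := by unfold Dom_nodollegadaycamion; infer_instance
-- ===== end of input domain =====

-- B replaces A's one-pass state machine by index arithmetic (first two '.' positions, slices, last-'s' index); objective: simpler.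


-- ===== PORT A =====
-- A's loop, transliterated: state (indice, count, aux, primerultimo, nuevalista); the four ifs
-- are applied in order with the sequentially-updated state (in the d-dot branch Python sets
-- primerultimo twice, aux then indice, so the net new primerultimo is indice while the appended
-- slice uses aux).  Python's uninitialised primerultimo is only read after being set; it is
-- modelled with initial value 0 (never read before first assignment).  Slices lista[a:b] with
-- nonnegative a, b are exactly (lista.take b).drop a; ''.join is String.join;
-- lista[0] is only evaluated with rest nonempty, so headD "" is exact.
def nodoLoopA (lista : List String) (rest : List String) (indice count aux primerultimo : Nat)
    (nuevalista : List String) : Option (List String) :=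
  match rest with
  | [] => none
  | x :: xs =>
    if x = "." ∧ count = 1 then
      some (nuevalista ++ [String.join ((lista.take indice).drop (primerultimo + 1))])
    else
      let count1 := if x = "." ∧ count = 0 ∧ lista.headD "" ≠ "d" then count + 1 else count
      let primer1 := if x = "." ∧ count = 0 ∧ lista.headD "" ≠ "d" then indice else primerultimo
      let nueva1 := if x = "." ∧ count = 0 ∧ lista.headD "" ≠ "d" then
          nuevalista ++ [String.join (lista.take indice)] else nuevalista
      let aux1 := if x = "s" ∧ lista.headD "" = "d" then indice else aux
      let count2 := if x = "." ∧ count1 = 0 ∧ lista.headD "" = "d" then count1 + 1 else count1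
      let nueva2 := if x = "." ∧ count1 = 0 ∧ lista.headD "" = "d" then
          nueva1 ++ [String.join (lista.take aux1)] else nueva1
      let primer2 := if x = "." ∧ count1 = 0 ∧ lista.headD "" = "d" then indice else primer1
      nodoLoopA lista xs (indice + 1) count2 aux1 primer2 nueva2

def nodollegadaycamion (lista : List String) : Option (List String) :=
  nodoLoopA lista lista 0 0 0 0 []

-- ===== PORT B =====
-- Source B: lista.index(".") is PySem.List.index?; lista.index(".", i1+1) is i1+1 plus the index in
-- the dropped suffix; slices with nonnegative bounds are take/drop; the comprehension over
-- enumerate(lista[:i1]) is filterMap over PySem.List.enumerate; ks[-1] if ks else 0 is getLastD 0.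
def nodollegadaycamion_alt (lista : List String) : Option (List String) :=
  match PySem.List.index? lista "." with
  | none => none
  | some i1 =>
    match PySem.List.index? (lista.drop (i1 + 1)) "." with
    | none => none
    | some j =>
      let i2 := i1 + 1 + j
      let middle := String.join ((lista.take i2).drop (i1 + 1))
      if lista.headD "" = "d" then
        let ks := (PySem.List.enumerate (lista.take i1)).filterMap
            (fun kv => if kv.2 = "s" then some kv.1 else none)
        some [String.join (lista.take (ks.getLastD 0).toNat), middle]
      else
        some [String.join (lista.take i1), middle]

-- ===== PRECONDITION & SPEC =====
def Spec_nodollegadaycamion (lista : List String) (out : Option (List String)) : Prop := out = nodollegadaycamion_alt lista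
instance (lista : List String) (out : Option (List String)) : Decidable (Spec_nodollegadaycamion lista out) := by unfold Spec_nodollegadaycamion; infer_instance

-- ===== CLAIM (what is proved, stated in full; the proofs are below) =====
def Claim_equal_nodollegadaycamion : Prop := ∀ (lista : List String), Dom_nodollegadaycamion lista → Spec_nodollegadaycamion lista (nodollegadaycamion lista)



-- ===== LEMMAS AND PROOFS =====

-- aux as A's loop evolves it over the first j elements of rest (the prefix before the first "."):
-- the absolute index of the last "s" there, or `aux` if none.
def auxF : List String → Nat → Nat → Nat → Nat
  | _, 0, _, aux => aux
  | [], _, _, aux => aux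
  | x :: xs, j + 1, indice, aux => auxF xs j (indice + 1) (if x = "s" then indice else aux)

-- Phase count = 1 of A's loop: scanning for the second dot.
lemma loopA_one : ∀ (rest lista : List String) (indice aux p : Nat) (h : String),
    nodoLoopA lista rest indice 1 aux p [h] =
    (PySem.List.index? rest ".").map
      (fun j => [h, String.join ((lista.take (indice + j)).drop (p + 1))]) := by
  intro rest
  induction rest with
  | nil => intro lista indice aux p h; simp [nodoLoopA, PySem.List.index?]
  | cons x xs ih =>
    intro lista indice aux p h
    by_cases hx : x = "."
    · subst hx
      rw [PySem.List.index?_cons_self]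
      simp [nodoLoopA]
    · rw [PySem.List.index?_cons_of_ne _ hx]
      rw [nodoLoopA]
      simp only [hx, false_and, if_false]
      rw [ih]
      cases hidx : PySem.List.index? xs "." with
      | none => simp
      | some j =>
        have : indice + 1 + j = indice + (j + 1) := by omega
        simp [this]

-- Phase count = 0 of A's loop (from the start): the full result as a function of the two dot
-- positions and, in the "d" case, of auxF.
lemma loopA_zero : ∀ (rest lista : List String) (indice aux p : Nat),
    nodoLoopA lista rest indice 0 aux p [] =
    (match PySem.List.index? rest "." with
     | none => none
     | some j =>
        (PySem.List.index? (rest.drop (j + 1)) ".").map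
          (fun k =>
            [if lista.headD "" = "d" then String.join (lista.take (auxF rest j indice aux))
             else String.join (lista.take (indice + j)),
             String.join ((lista.take (indice + j + 1 + k)).drop (indice + j + 1))])) := by
  intro rest
  induction rest with
  | nil => intro lista indice aux p; simp [nodoLoopA, PySem.List.index?]
  | cons x xs ih =>
    intro lista indice aux p
    have hds : ("." : String) ≠ "s" := by decide
    by_cases hx : x = "."
    · subst hx
      rw [PySem.List.index?_cons_self]
      rw [nodoLoopA]
      by_cases hd : lista.headD "" = "d"
      · simp only [hd, hds, ne_eq, not_true_eq_false, and_false, false_and, if_false,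
          and_true, true_and, Nat.zero_ne_one, if_true, List.nil_append, eq_self_iff_true]
        rw [loopA_one]
        simp only [List.drop_succ_cons, List.drop_zero]
        cases hk : PySem.List.index? xs "." with
        | none => simp
        | some k =>
          have h1 : indice + 1 + k = indice + 0 + 1 + k := by omega
          simp [auxF, h1]
      · simp only [hd, hds, ne_eq, not_false_eq_true, and_true, true_and, if_true, if_false,
          and_false, false_and, Nat.zero_ne_one, List.nil_append, eq_self_iff_true]
        rw [loopA_one]
        simp only [List.drop_succ_cons, List.drop_zero]
        cases hk : PySem.List.index? xs "." with
        | none => simp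
        | some k =>
          have h1 : indice + 1 + k = indice + 0 + 1 + k := by omega
          have h2 : indice + 0 = indice := by omega
          simp [h1, h2, hd]
    · rw [PySem.List.index?_cons_of_ne _ hx]
      rw [nodoLoopA]
      simp only [hx, false_and, if_false]
      rw [ih]
      cases hidx : PySem.List.index? xs "." with
      | none => simp
      | some j =>
        have hauxF : auxF (x :: xs) (j + 1) indice aux
            = auxF xs j (indice + 1) (if x = "s" then indice else aux) := rfl
        have hi : indice + (j + 1) = indice + 1 + j := by omega
        have hd2 : lista.head?.getD "" = lista.headD "" := by cases lista <;> rfl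
        by_cases hd : lista.headD "" = "d"
        · have hd' : lista.head?.getD "" = "d" := by rw [hd2]; exact hd
          by_cases hs : x = "s"
          · subst hs; simp [hd, hd', hauxF, hi]
          · simp [hd, hd', hs, hauxF, hi]
        · have hd' : ¬lista.head?.getD "" = "d" := by rw [hd2]; exact hd
          simp [hd, hd', hi]

-- auxF equals the getLastD of B's filtered enumerate of the prefix.
lemma auxF_eq : ∀ (l : List String) (j indice aux : Nat),
    auxF l j indice aux =
    (((PySem.List.enumerate (l.take j) (indice : Int)).filterMap
        (fun kv => if kv.2 = "s" then some kv.1 else none)).getLastD (aux : Int)).toNat := by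
  intro l
  induction l with
  | nil => intro j indice aux; cases j <;> simp [auxF, PySem.List.enumerate_nil]
  | cons x xs ih =>
    intro j indice aux
    cases j with
    | zero => simp [auxF, PySem.List.enumerate_nil]
    | succ j =>
      rw [show auxF (x :: xs) (j + 1) indice aux
          = auxF xs j (indice + 1) (if x = "s" then indice else aux) from rfl, ih]
      rw [List.take_succ_cons, PySem.List.enumerate_cons, List.filterMap_cons]
      by_cases hs : x = "s"
      · rw [if_pos (show ((↑indice : Int), x).2 = "s" from hs)]
        rw [if_pos hs]
        push_cast
        rw [List.getLastD_cons]
      · rw [if_neg (show ¬((↑indice : Int), x).2 = "s" from hs), if_neg hs]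
        push_cast
        rfl

-- ===== VERDICT (by name: the statement is the Claim_ definition above) =====
theorem nodollegadaycamion_spec : Claim_equal_nodollegadaycamion := by
  intro lista _
  unfold Spec_nodollegadaycamion nodollegadaycamion nodollegadaycamion_alt
  rw [loopA_zero]
  cases h1 : PySem.List.index? lista "." with
  | none => rfl
  | some i1 =>
    have h2e := PySem.List.index?_eq_idxOf? (lista.drop (i1 + 1)) "."
    cases h2 : PySem.List.index? (lista.drop (i1 + 1)) "." with
    | none =>
      rw [h2] at h2e
      simp [← h2e]
    | some j =>
      rw [h2] at h2e
      simp only [← h2e.symm, h2]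
      by_cases hd : lista.headD "" = "d"
      · have hd' : lista.head?.getD "" = "d" := by
          cases lista with
          | nil => exact hd
          | cons a l => exact hd
        simp only [hd, if_true, auxF_eq, Nat.zero_add]
        rw [← h2e]; norm_cast
      · have hd' : ¬lista.head?.getD "" = "d" := by
          cases lista with
          | nil => exact hd
          | cons a l => exact hd
        simp only [hd, if_false, Nat.zero_add]
        rw [← h2e]; norm_cast
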